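-- pv_equiv track=rewrite | github.com/yungdennek/KenKen-Solver | Ken Ken Solver.py | block_by_position
-- ===== SOURCE A (Python) =====
-- def rc_to_pos(row, col, n):
--     return (row - 1) * n + col
--
-- def block_by_position(blocks, row, col, n):
--     b = blocks[0]
--     for block in blocks:
--         pos = block[2]
--         for p in pos:
--             if p == rc_to_pos(row, col, n):
--                 b = block
--     return b
-- ===== SOURCE B (Python) =====
-- def rc_to_pos(row, col, n):
--     return (row - 1) * n + col
--
-- def block_by_position(blocks, row, col, n):
--     b = blocks[0]
--     target = rc_to_pos(row, col, n)
--     for block in reversed(blocks):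
--         if target in block[2]:
--             return block
--     return b
-- ===== Notes on version B (the rewrite author's own statement) =====
-- stated objective: alternative
-- what changed: Replaces A's forward keep-last accumulator scan over every position with a reverse scan that returns the first block containing the target (early exit via membership test); the last forward match is the first reverse match.
import Mathlib
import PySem

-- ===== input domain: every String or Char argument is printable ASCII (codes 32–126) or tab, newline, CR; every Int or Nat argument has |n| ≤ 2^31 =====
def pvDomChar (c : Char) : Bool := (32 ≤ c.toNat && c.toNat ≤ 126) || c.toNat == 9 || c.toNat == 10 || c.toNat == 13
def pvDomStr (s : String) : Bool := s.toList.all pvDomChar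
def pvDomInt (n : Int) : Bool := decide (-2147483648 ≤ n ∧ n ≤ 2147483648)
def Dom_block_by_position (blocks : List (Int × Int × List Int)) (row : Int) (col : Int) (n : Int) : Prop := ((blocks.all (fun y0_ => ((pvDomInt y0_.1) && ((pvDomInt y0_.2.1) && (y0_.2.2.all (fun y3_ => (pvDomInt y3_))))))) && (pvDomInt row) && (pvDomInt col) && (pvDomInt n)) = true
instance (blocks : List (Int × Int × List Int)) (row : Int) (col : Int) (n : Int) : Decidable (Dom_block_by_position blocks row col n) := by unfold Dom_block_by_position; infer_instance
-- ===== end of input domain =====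

-- B scans the blocks in reverse and returns the first block containing the target
-- position (early exit), instead of A's forward keep-last accumulator scan (alternative, same worst-case cost).


-- ===== PORT A =====
def rc_to_pos (row col n : Int) : Int := (row - 1) * n + col

def block_by_position (blocks : List (Int × Int × List Int)) (row : Int) (col : Int) (n : Int) : Int × Int × List Int :=
  match blocks with
  | [] => (0, 0, [])   -- blocks[0] raises IndexError in Python; excluded by Pre_
  | b0 :: _ =>
    blocks.foldl (fun b block =>
      block.2.2.foldl (fun b p => if p = rc_to_pos row col n then block else b) b) b0

-- ===== PORT B =====
-- B's loop over reversed(blocks) with an early `return block` on membership.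
def revScan (target : Int) : List (Int × Int × List Int) → (Int × Int × List Int) → Int × Int × List Int
  | [], b => b
  | block :: rest, b => if target ∈ block.2.2 then block else revScan target rest b

def block_by_position_alt (blocks : List (Int × Int × List Int)) (row : Int) (col : Int) (n : Int) : Int × Int × List Int :=
  match blocks with
  | [] => (0, 0, [])   -- blocks[0] raises IndexError in Python; excluded by Pre_
  | b0 :: _ =>
    let target := rc_to_pos row col n
    revScan target blocks.reverse b0

-- ===== PRECONDITION & SPEC =====
-- Pre_ excludes the empty blocks list, on which both Pythons raise IndexError at blocks[0].
def Pre_block_by_position (blocks : List (Int × Int × List Int)) (row : Int) (col : Int) (n : Int) : Prop := blocks ≠ []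
instance (blocks : List (Int × Int × List Int)) (row : Int) (col : Int) (n : Int) : Decidable (Pre_block_by_position blocks row col n) := by unfold Pre_block_by_position; infer_instance
def pvWitness_block_by_position : (List (Int × Int × List Int)) × Int × Int × Int := ([(3, 1, [1, 2]), (4, 0, [3, 4])], 1, 2, 2)
def Spec_block_by_position (blocks : List (Int × Int × List Int)) (row : Int) (col : Int) (n : Int) (out : Int × Int × List Int) : Prop := out = block_by_position_alt blocks row col n
instance (blocks : List (Int × Int × List Int)) (row : Int) (col : Int) (n : Int) (out : Int × Int × List Int) : Decidable (Spec_block_by_position blocks row col n out) := by unfold Spec_block_by_position; infer_instance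

-- ===== CLAIM (what is proved, stated in full; the proofs are below) =====
def Claim_equal_block_by_position : Prop := ∀ (blocks : List (Int × Int × List Int)) (row : Int) (col : Int) (n : Int), Dom_block_by_position blocks row col n → Pre_block_by_position blocks row col n → Spec_block_by_position blocks row col n (block_by_position blocks row col n)

-- ===== LEMMAS AND PROOFS =====

-- A's inner loop keeps the last match: result is blk if the target occurs in ps, else the input b.
theorem innerA_eq (blk : Int × Int × List Int) (t : Int) :
    ∀ (ps : List Int) (b : Int × Int × List Int),
      ps.foldl (fun b p => if p = t then blk else b) b = if t ∈ ps then blk else b := by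
  intro ps
  induction ps with
  | nil => intro b; simp
  | cons p ps ih =>
    intro b
    simp only [List.foldl_cons, ih, List.mem_cons]
    by_cases hp : p = t <;> by_cases hm : t ∈ ps <;> simp [hp, hm] <;> tauto

-- revScan over an append: search the front; if it fails, the result of searching the back is the default.
theorem revScan_append (t : Int) :
    ∀ (xs ys : List (Int × Int × List Int)) (b : Int × Int × List Int),
      revScan t (xs ++ ys) b = revScan t xs (revScan t ys b) := by
  intro xs
  induction xs with
  | nil => intro ys b; rfl
  | cons blk rest ih =>
    intro ys b
    simp only [List.cons_append, revScan, ih]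

-- First match in reverse order = last match in forward order (A's foldl shape).
theorem revScan_eq_foldl (t : Int) :
    ∀ (blocks : List (Int × Int × List Int)) (b : Int × Int × List Int),
      revScan t blocks.reverse b
        = blocks.foldl (fun b block =>
            block.2.2.foldl (fun b p => if p = t then block else b) b) b := by
  intro blocks
  induction blocks with
  | nil => intro b; rfl
  | cons blk rest ih =>
    intro b
    simp only [List.reverse_cons, revScan_append, List.foldl_cons, innerA_eq, ih, revScan]

-- ===== VERDICT (by name: the statement is the Claim_ definition above) =====
theorem block_by_position_spec : Claim_equal_block_by_position := by
  intro blocks row col n _ hpre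
  unfold Spec_block_by_position block_by_position block_by_position_alt
  match blocks with
  | [] => exact absurd rfl hpre
  | b0 :: rest =>
    simp only [revScan_eq_foldl]
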